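-- pv_equiv track=rewrite | github.com/Duosis-Developer-Team/project-zabake | zabbix-monitoring/scripts/utils/host_metadata.py | extract_host_template_names
-- ===== SOURCE A (Python) =====
-- from typing import Any, Dict, List, Tuple
--
-- def extract_host_template_names(host: Dict[str, Any]) -> str:
--     """
--     Comma-separated names of all templates linked to the host (parentTemplates).
--     Sorted alphabetically for stable output.
--     """
--     parents = host.get("parentTemplates") or []
--     names: List[str] = []
--     for entry in parents:
--         name = (entry.get("name") or "").strip()
--         if name and name not in names:
--             names.append(name)
--     names.sort()
--     return ", ".join(names)
-- ===== SOURCE B (Python) =====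
-- def extract_host_template_names(host):
--     """
--     Comma-separated names of all templates linked to the host (parentTemplates).
--     Sorted alphabetically for stable output.
--
--     Sorts all stripped non-empty names first, then removes adjacent duplicates
--     in one linear pass (dedup after sort instead of a membership scan per entry).
--     """
--     parents = host.get("parentTemplates") or []
--     names = sorted(n for n in ((entry.get("name") or "").strip() for entry in parents) if n)
--     result = []
--     for name in names:
--         if not result or result[-1] != name:
--             result.append(name)
--     return ", ".join(result)
-- ===== Notes on version B (the rewrite author's own statement) =====
-- stated objective: alternative
-- what changed: B collects all stripped non-empty names with a comprehension (no dedup while collecting), sorts the whole list, and deduplicates in one linear pass by skipping names equal to the last kept one, instead of A's per-entry 'name not in names' membership scan before sorting.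
import Mathlib
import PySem

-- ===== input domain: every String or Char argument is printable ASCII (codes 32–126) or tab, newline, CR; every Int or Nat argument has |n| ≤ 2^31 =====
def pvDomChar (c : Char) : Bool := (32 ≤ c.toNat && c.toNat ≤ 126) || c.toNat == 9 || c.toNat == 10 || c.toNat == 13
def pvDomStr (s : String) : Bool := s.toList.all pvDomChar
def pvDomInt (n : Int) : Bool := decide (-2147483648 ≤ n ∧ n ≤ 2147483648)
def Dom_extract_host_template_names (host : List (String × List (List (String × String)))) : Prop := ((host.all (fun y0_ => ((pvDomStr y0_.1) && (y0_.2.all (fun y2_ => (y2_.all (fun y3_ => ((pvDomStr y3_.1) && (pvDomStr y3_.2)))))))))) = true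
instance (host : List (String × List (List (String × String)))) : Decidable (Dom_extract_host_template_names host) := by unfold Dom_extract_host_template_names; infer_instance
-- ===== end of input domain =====

-- B sorts all stripped non-empty names first and removes adjacent duplicates in one
-- linear pass, instead of A's per-entry membership scan (dedup) before sorting.

-- ===== PORT A =====
def extract_host_template_names (host : List (String × List (List (String × String)))) : String :=
  -- parents = host.get("parentTemplates") or []  ('or []' turns a missing key into [];
  -- an empty list value is falsy and also becomes [], which getD [] matches exactly)
  let parents := ((PySem.Dict.mk host).get? "parentTemplates").getD []
  -- for entry in parents: name = (entry.get("name") or "").strip(); if name and name not in names: names.append(name)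
  let names := parents.foldl (fun (names : List String) entry =>
    let name := PySem.Str.strip (((PySem.Dict.mk entry).get? "name").getD "")
    if name ≠ "" ∧ name ∉ names then names ++ [name] else names) []
  -- names.sort(); return ", ".join(names)
  PySem.Str.join ", " (PySem.List.sorted names (fun x => x) false)

-- ===== PORT B =====
def extract_host_template_names_alt (host : List (String × List (List (String × String)))) : String :=
  let parents := ((PySem.Dict.mk host).get? "parentTemplates").getD []
  -- names = sorted(n for n in ((entry.get("name") or "").strip() for entry in parents) if n)
  let names := PySem.List.sorted
    ((parents.map (fun entry => PySem.Str.strip (((PySem.Dict.mk entry).get? "name").getD ""))).filter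
      (fun n => n ≠ "")) (fun x => x) false
  -- for name in names: if not result or result[-1] != name: result.append(name)
  let result := names.foldl (fun (result : List String) name =>
    if result = [] ∨ result.getLast? ≠ some name then result ++ [name] else result) []
  PySem.Str.join ", " result

-- ===== PRECONDITION & SPEC =====
def Spec_extract_host_template_names (host : List (String × List (List (String × String)))) (out : String) : Prop := out = extract_host_template_names_alt host
instance (host : List (String × List (List (String × String)))) (out : String) : Decidable (Spec_extract_host_template_names host out) := by unfold Spec_extract_host_template_names; infer_instance

-- ===== CLAIM (what is proved, stated in full; the proofs are below) =====
def Claim_equal_extract_host_template_names : Prop := ∀ (host : List (String × List (List (String × String)))), Dom_extract_host_template_names host → Spec_extract_host_template_names host (extract_host_template_names host)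

-- ===== LEMMAS AND PROOFS =====

-- A's accumulation loop is ordered dedup (PySem.Set.ofList) of the filtered name list.
theorem loopA_eq_dedup (f : List (String × String) → String) (parents : List (List (String × String))) (acc : List String) :
    parents.foldl (fun (names : List String) entry =>
      let name := f entry
      if name ≠ "" ∧ name ∉ names then names ++ [name] else names) acc
    = ((parents.map f).filter (fun n => n ≠ "")).foldl PySem.Set.add acc := by
  induction parents generalizing acc with
  | nil => rfl
  | cons e rest ih =>
    simp only [List.foldl_cons, List.map_cons, List.filter_cons]
    by_cases h0 : f e = ""
    · simp [h0, ih]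
    · by_cases hm : f e ∈ acc
      · simp [h0, hm, ih, PySem.Set.add]
      · simp [h0, hm, ih, PySem.Set.add]

-- Invariant of B's adjacent-dedup pass over a ≤-sorted list: the result is strictly
-- increasing and holds exactly the elements seen.
theorem adj_fold_invariant (l r : List String)
    (hl : l.Pairwise (· ≤ ·)) (hr : r.Pairwise (· < ·))
    (hrl : ∀ x ∈ r, ∀ y ∈ l, x ≤ y) :
    (l.foldl (fun (result : List String) name =>
      if result = [] ∨ result.getLast? ≠ some name then result ++ [name] else result) r).Pairwise (· < ·)
    ∧ ∀ x, x ∈ (l.foldl (fun (result : List String) name =>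
      if result = [] ∨ result.getLast? ≠ some name then result ++ [name] else result) r) ↔ x ∈ r ∨ x ∈ l := by
  induction l generalizing r with
  | nil => exact ⟨hr, fun x => by simp⟩
  | cons n rest ih =>
    simp only [List.foldl_cons]
    by_cases hc : r = [] ∨ r.getLast? ≠ some n
    · -- append n
      have hlt : ∀ x ∈ r, x < n := by
        intro x hx
        have hne : r ≠ [] := by rintro rfl; simp at hx
        cases hgl : r.getLast? with
        | none => exact absurd (List.getLast?_eq_none_iff.mp hgl) hne
        | some m =>
          rcases List.getLast?_eq_some_iff.mp hgl with ⟨r', rfl⟩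
          have hmn : m ≤ n := hrl m (by simp) n (by simp)
          have hmne : m ≠ n := by
            rcases hc with hnil | hlast
            · exact absurd hnil hne
            · intro h; exact hlast (by rw [hgl, h])
          rcases List.mem_append.mp hx with h | h
          · exact lt_of_lt_of_le ((List.pairwise_append.mp hr).2.2 x h m (by simp)) hmn
          · simp at h; subst h
            exact lt_of_le_of_ne hmn hmne
      rw [if_pos hc]
      have hr' : (r ++ [n]).Pairwise (· < ·) := by
        rw [List.pairwise_append]
        refine ⟨hr, List.pairwise_singleton _ _, ?_⟩
        intro x hx y hy; simp at hy; subst hy; exact hlt x hx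
      have hrl' : ∀ x ∈ r ++ [n], ∀ y ∈ rest, x ≤ y := by
        intro x hx y hy
        rcases List.mem_append.mp hx with h | h
        · exact hrl x h y (by simp [hy])
        · simp at h; subst h
          exact (List.pairwise_cons.mp hl).1 y hy
      rcases ih (r ++ [n]) (List.pairwise_cons.mp hl).2 hr' hrl' with ⟨h1, h2⟩
      refine ⟨h1, fun x => ?_⟩
      rw [h2 x]; simp [or_assoc, or_comm, or_left_comm]
    · -- skip: n is already the last element of r
      rw [if_neg hc]
      rw [not_or, not_not] at hc
      have hnr : n ∈ r := List.mem_of_getLast? hc.2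
      rcases ih r (List.pairwise_cons.mp hl).2 hr
        (fun x hx y hy => hrl x hx y (by simp [hy])) with ⟨h1, h2⟩
      refine ⟨h1, fun x => ?_⟩
      rw [h2 x]
      constructor
      · rintro (h | h)
        · exact Or.inl h
        · exact Or.inr (by simp [h])
      · rintro (h | h)
        · exact Or.inl h
        · rcases List.mem_cons.mp h with rfl | h
          · exact Or.inl hnr
          · exact Or.inr h

-- The two pipelines produce the same list, hence the same joined string.
theorem ports_agree (f : List (String × String) → String) (parents : List (List (String × String))) :
    PySem.Str.join ", " (PySem.List.sorted
      (parents.foldl (fun (names : List String) entry =>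
        let name := f entry
        if name ≠ "" ∧ name ∉ names then names ++ [name] else names) [])
      (fun x => x) false)
    = PySem.Str.join ", "
      ((PySem.List.sorted ((parents.map f).filter (fun n => n ≠ "")) (fun x => x) false).foldl
        (fun (result : List String) name =>
          if result = [] ∨ result.getLast? ≠ some name then result ++ [name] else result) []) := by
  rw [loopA_eq_dedup]
  congr 1
  set L := (parents.map f).filter (fun n => n ≠ "") with hL
  have hSp : (PySem.List.sorted L (fun x => x) false).Pairwise (· ≤ ·) :=
    PySem.List.sorted_pairwise L (fun x => x)
  rcases adj_fold_invariant (PySem.List.sorted L (fun x => x) false) [] hSp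
    (List.Pairwise.nil) (by simp) with ⟨h1, h2⟩
  apply PySem.List.sorted_eq_of_perm_of_pairwise_lt
  · rw [List.perm_ext_iff_of_nodup (List.Pairwise.imp (fun h => ne_of_lt h) h1) ?_]
    · intro x
      rw [h2 x, ← PySem.Set.ofList_eq_foldl]
      simp [PySem.Set.mem_ofList, PySem.List.mem_sorted]
    · rw [← PySem.Set.ofList_eq_foldl]
      exact PySem.Set.nodup_ofList L
  · exact h1

-- ===== VERDICT (by name: the statement is the Claim_ definition above) =====
theorem extract_host_template_names_spec : Claim_equal_extract_host_template_names := by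
  intro host _
  show extract_host_template_names host = extract_host_template_names_alt host
  exact ports_agree (fun entry => PySem.Str.strip (((PySem.Dict.mk entry).get? "name").getD ""))
    (((PySem.Dict.mk host).get? "parentTemplates").getD [])
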